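-- pv_equiv track=rewrite | github.com/KlparetlR/amachoco3-RenPy | patchX.py | preprocess_json
-- ===== SOURCE A (Python) =====
-- from collections import defaultdict
--
-- def preprocess_json(raw_json):
--     # 生成 forbidden 集合(raw有立绘关键字重复)和 allow_map
--     raw_map = defaultdict(list)  # raw => [(fname, rep, keyid)]
--     for kid, entry in raw_json.items():
--         for k, v in entry.items():
--             if k == "raw":
--                 continue
--             raw_map[ entry['raw'] ].append( (k, v, kid) )
--     forbidden = set()
--     allow_map = {}
--     for rtxt, lst in raw_map.items():
--         counter = defaultdict(set)
--         for fname, rep, _ in lst: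
--             counter[fname].add(rep)
--         conflicted = [fname for fname, reps in counter.items() if len(reps) > 1]
--         if conflicted:
--             forbidden.add(rtxt)
--         else:
--             allow_map[rtxt] = [ (fname, rep) for fname, rep, _ in lst ]
--     return forbidden, allow_map
-- ===== SOURCE B (Python) =====
-- def has_conflict(pairs):
--     for i, (f1, r1) in enumerate(pairs):
--         for f2, r2 in pairs[i + 1:]:
--             if f1 == f2 and r1 != r2:
--                 return True
--     return False
--
-- def preprocess_json(raw_json):
--     occurrences = [(entry['raw'], k, v)
--                    for entry in raw_json.values()
--                    for k, v in entry.items() if k != "raw"]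
--     groups = {}
--     for raw, fname, rep in occurrences:
--         groups.setdefault(raw, []).append((fname, rep))
--     forbidden = {raw for raw, pairs in groups.items() if has_conflict(pairs)}
--     allow_map = {raw: pairs for raw, pairs in groups.items() if not has_conflict(pairs)}
--     return forbidden, allow_map
-- ===== Notes on version B (the rewrite author's own statement) =====
-- stated objective: alternative
-- what changed: B flattens raw_json into one (raw, fname, rep) occurrence list, groups it once, and detects conflicts by a direct pairwise scan of each group's (fname, rep) pairs, instead of A's per-group defaultdict(set) counter and length check.
import Mathlib
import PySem

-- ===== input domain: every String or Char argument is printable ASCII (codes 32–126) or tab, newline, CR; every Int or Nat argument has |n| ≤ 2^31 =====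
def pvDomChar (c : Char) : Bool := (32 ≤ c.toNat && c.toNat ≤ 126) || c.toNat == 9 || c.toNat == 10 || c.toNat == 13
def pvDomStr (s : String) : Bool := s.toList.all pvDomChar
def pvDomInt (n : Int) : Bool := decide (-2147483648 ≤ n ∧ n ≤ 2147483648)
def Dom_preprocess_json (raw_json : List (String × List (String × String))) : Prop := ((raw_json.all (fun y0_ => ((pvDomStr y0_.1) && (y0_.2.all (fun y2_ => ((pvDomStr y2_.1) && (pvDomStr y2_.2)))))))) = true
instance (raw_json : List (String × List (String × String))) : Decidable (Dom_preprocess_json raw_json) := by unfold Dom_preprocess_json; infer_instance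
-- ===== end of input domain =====

-- B replaces A's per-group defaultdict(set) counter pass by a flatten-then-group pass and a direct
-- pairwise scan for conflicting replacements (objective: alternative decomposition, no speed claim).

-- ===== PORT A =====
-- entry['raw'] (first-match lookup; Pre_ guarantees the key is present and keys are unique —
-- on an entry without "raw" but with other keys Python raises KeyError, excluded by Pre_)
def pvEntryRaw (entry : List (String × String)) : String :=
  (PySem.Dict.mk entry).getD "raw" ""

-- raw_map = defaultdict(list); nested loop appending (k, v, kid) under entry['raw']
def pvA_raw_map (raw_json : List (String × List (String × String))) :
    PySem.Dict String (List (String × String × String)) :=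
  raw_json.foldl (fun m p =>
    p.2.foldl (fun m q =>
      if q.1 = "raw" then m
      else m.modify (pvEntryRaw p.2) [] (· ++ [(q.1, q.2, p.1)])) m) PySem.Dict.empty

-- counter = defaultdict(set); counter[fname].add(rep)
def pvA_counter (lst : List (String × String × String)) :
    PySem.Dict String (PySem.Set String) :=
  lst.foldl (fun c t => c.modify t.1 PySem.Set.empty (fun s => PySem.Set.add s t.2.1))
    PySem.Dict.empty

-- the loop over raw_map.items accumulating (forbidden, allow_map)
def pvA_result (raw_json : List (String × List (String × String))) :
    PySem.Set String × PySem.Dict String (List (String × String)) :=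
  (pvA_raw_map raw_json).items.foldl (fun acc rl =>
    if ((pvA_counter rl.2).items.filter
        (fun fr => 1 < PySem.Set.len fr.2)).map (·.1) ≠ [] then
      (PySem.Set.add acc.1 rl.1, acc.2)
    else (acc.1, acc.2.insert rl.1 (rl.2.map (fun t => (t.1, t.2.1)))))
    ((PySem.Set.empty : PySem.Set String),
     (PySem.Dict.empty : PySem.Dict String (List (String × String))))

def preprocess_json (raw_json : List (String × List (String × String))) :
    List String × (List (String × List (String × String))) :=
  ((pvA_result raw_json).1, (pvA_result raw_json).2.items)

-- ===== PORT B =====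
-- has_conflict: for i,(f1,r1) in enumerate(pairs): for (f2,r2) in pairs[i+1:]: …
def pvB_hasConflict : List (String × String) → Bool
  | [] => false
  | p :: rest => rest.any (fun q => p.1 == q.1 && p.2 != q.2) || pvB_hasConflict rest

-- occurrences = [(entry['raw'], k, v) for entry in raw_json.values() for k, v in entry.items() if k != "raw"]
def pvB_occurrences (raw_json : List (String × List (String × String))) :
    List (String × String × String) :=
  raw_json.flatMap (fun p =>
    (p.2.filter (fun q => q.1 ≠ "raw")).map (fun q => (pvEntryRaw p.2, q.1, q.2)))

-- groups.setdefault(raw, []).append((fname, rep))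
def pvB_groups (raw_json : List (String × List (String × String))) :
    PySem.Dict String (List (String × String)) :=
  (pvB_occurrences raw_json).foldl
    (fun g t => g.modify t.1 [] (· ++ [(t.2.1, t.2.2)])) PySem.Dict.empty

def preprocess_json_alt (raw_json : List (String × List (String × String))) :
    List String × (List (String × List (String × String))) :=
  (PySem.Set.ofList (((pvB_groups raw_json).items.filter
      (fun rl => pvB_hasConflict rl.2)).map (·.1)),
   (pvB_groups raw_json).items.filter (fun rl => !pvB_hasConflict rl.2))

-- ===== PRECONDITION & SPEC =====
-- Pre_ excludes (a) association lists with duplicate keys (outer kid keys or keys inside one entry),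
-- which do not denote a unique Python dict, and (b) entries that have a non-"raw" key but no "raw"
-- key, on which A raises KeyError at entry['raw'].
def Pre_preprocess_json (raw_json : List (String × List (String × String))) : Prop :=
  (raw_json.map (·.1)).Nodup ∧
  ∀ p ∈ raw_json, (p.2.map (·.1)).Nodup ∧
    ((∃ q ∈ p.2, q.1 ≠ "raw") → "raw" ∈ p.2.map (·.1))
instance (raw_json : List (String × List (String × String))) : Decidable (Pre_preprocess_json raw_json) := by unfold Pre_preprocess_json; infer_instance

def pvWitness_preprocess_json : (List (String × List (String × String))) :=
  [("1", [("raw", "hello"), ("f", "x")]), ("2", [("raw", "hello"), ("f", "x")])]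

def Spec_preprocess_json (raw_json : List (String × List (String × String))) (out : List String × (List (String × List (String × String)))) : Prop := out = preprocess_json_alt raw_json
instance (raw_json : List (String × List (String × String))) (out : List String × (List (String × List (String × String)))) : Decidable (Spec_preprocess_json raw_json out) := by unfold Spec_preprocess_json; infer_instance

-- ===== CLAIM (what is proved, stated in full; the proofs are below) =====
def Claim_equal_preprocess_json : Prop := ∀ (raw_json : List (String × List (String × String))), Dom_preprocess_json raw_json → Pre_preprocess_json raw_json → Spec_preprocess_json raw_json (preprocess_json raw_json)

-- ===== LEMMAS AND PROOFS =====

-- drop the keyid from a triple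
def pvProj (t : String × String × String) : String × String := (t.1, t.2.1)

-- map a function over all values of a dict (proof-side helper)
def pvMapVals {ν ν' : Type} (f : ν → ν') (d : PySem.Dict String ν) : PySem.Dict String ν' :=
  PySem.Dict.mk (d.items.map (fun p => (p.1, f p.2)))

-- A's key/value stream, flattened (values still carry the kid)
def pvA_occ (raw_json : List (String × List (String × String))) :
    List (String × (String × String × String)) :=
  raw_json.flatMap (fun p =>
    (p.2.filter (fun q => q.1 ≠ "raw")).map (fun q => (pvEntryRaw p.2, (q.1, q.2, p.1))))

theorem pvA_inner_foldl (entry : List (String × String)) (K kid : String) :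
    ∀ m : PySem.Dict String (List (String × String × String)),
      entry.foldl (fun m q =>
          if q.1 = "raw" then m else m.modify K [] (· ++ [(q.1, q.2, kid)])) m =
        ((entry.filter (fun q => q.1 ≠ "raw")).map (fun q => (K, (q.1, q.2, kid)))).foldl
          (fun m e => m.modify e.1 [] (· ++ [e.2])) m := by
  induction entry with
  | nil => intro m; rfl
  | cons q rest ih => intro m; by_cases h : q.1 = "raw" <;> simp [h, ih]

theorem pvA_raw_map_eq_foldl_occ (raw_json : List (String × List (String × String))) :
    pvA_raw_map raw_json =
      (pvA_occ raw_json).foldl (fun m e => m.modify e.1 [] (· ++ [e.2])) PySem.Dict.empty := by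
  unfold pvA_raw_map pvA_occ
  rw [List.foldl_flatMap]
  apply PySem.List.foldl_congr_mem
  intro m p _
  exact pvA_inner_foldl p.2 (pvEntryRaw p.2) p.1 m

theorem pvB_occurrences_eq (raw_json : List (String × List (String × String))) :
    pvB_occurrences raw_json = (pvA_occ raw_json).map (fun e => (e.1, pvProj e.2)) := by
  unfold pvB_occurrences pvA_occ
  simp [List.map_flatMap, Function.comp_def, pvProj]

theorem pvMapVals_modify (d : PySem.Dict String (List (String × String × String)))
    (k : String) (x : String × String × String) :
    pvMapVals (List.map pvProj) (d.modify k [] (· ++ [x])) =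
      (pvMapVals (List.map pvProj) d).modify k [] (· ++ [pvProj x]) := by
  have hcon : (pvMapVals (List.map pvProj) d).contains k = d.contains k := by
    simp only [pvMapVals, PySem.Dict.contains, List.any_map,
      Function.comp_def]
  have hget : (pvMapVals (List.map pvProj) d).getD k [] = (d.getD k []).map pvProj := by
    simp only [pvMapVals, PySem.Dict.getD, PySem.Dict.get?]
    rw [List.find?_map]
    simp only [Function.comp_def]
    cases List.find? (fun p => p.1 == k) d.items <;> simp
  simp only [PySem.Dict.modify, PySem.Dict.insert, hcon, hget]
  by_cases h : d.contains k = true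
  · simp only [h, if_true]
    apply congrArg PySem.Dict.mk
    simp only [pvMapVals, List.map_map]
    apply List.map_congr_left
    intro p _
    by_cases hp : p.1 == k <;> simp [hp, Function.comp]
  · simp only [h]
    apply congrArg PySem.Dict.mk
    simp [pvMapVals]

theorem pvMapVals_foldl (l : List (String × (String × String × String)))
    (d : PySem.Dict String (List (String × String × String))) :
    pvMapVals (List.map pvProj) (l.foldl (fun m e => m.modify e.1 [] (· ++ [e.2])) d) =
      (l.map (fun e => (e.1, pvProj e.2))).foldl (fun m e => m.modify e.1 [] (· ++ [e.2]))
        (pvMapVals (List.map pvProj) d) := by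
  induction l generalizing d with
  | nil => rfl
  | cons e rest ih =>
      simp only [List.foldl_cons, List.map_cons]
      rw [ih, pvMapVals_modify]

theorem pvB_groups_eq (raw_json : List (String × List (String × String))) :
    pvB_groups raw_json = pvMapVals (List.map pvProj) (pvA_raw_map raw_json) := by
  unfold pvB_groups
  rw [pvA_raw_map_eq_foldl_occ, pvMapVals_foldl, pvB_occurrences_eq]
  rfl

theorem pvA_raw_map_keys_nodup (raw_json : List (String × List (String × String))) :
    (pvA_raw_map raw_json).keys.Nodup := by
  rw [pvA_raw_map_eq_foldl_occ]
  exact PySem.Dict.nodup_keys_foldl_modify_key (pvA_occ raw_json) (fun e => e.1) []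
    (fun _ e => (· ++ [e.2])) PySem.Dict.empty PySem.Dict.nodup_keys_empty

-- counter characterisation
theorem pvA_counter_getD_aux (l : List (String × String × String)) :
    ∀ (c : PySem.Dict String (PySem.Set String)) (f : String),
      ((l.foldl (fun c t => c.modify t.1 PySem.Set.empty (fun s => PySem.Set.add s t.2.1)) c).getD
          f PySem.Set.empty) =
        PySem.Set.update (c.getD f PySem.Set.empty)
          ((l.filter (fun t => t.1 = f)).map (fun t => t.2.1)) := by
  induction l with
  | nil => intro c f; rfl
  | cons t rest ih =>
      intro c f
      by_cases h : t.1 = f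
      · subst h
        simp only [List.foldl_cons, List.filter_cons, decide_true, if_true, List.map_cons, ih,
          PySem.Dict.getD_modify_self, PySem.Set.update_cons]
      · simp only [List.foldl_cons, List.filter_cons, h, decide_false, Bool.false_eq_true,
          if_false, ih, PySem.Dict.getD_modify_of_ne _ _ _ (Ne.symm h)]

theorem pvA_counter_getD (lst : List (String × String × String)) (f : String) :
    (pvA_counter lst).getD f PySem.Set.empty =
      PySem.Set.ofList ((lst.filter (fun t => t.1 = f)).map (fun t => t.2.1)) := by
  unfold pvA_counter
  rw [pvA_counter_getD_aux]
  simp [PySem.Set.update_nil_left]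

theorem pvA_counter_keys (lst : List (String × String × String)) :
    (pvA_counter lst).keys = PySem.Set.ofList (lst.map (·.1)) := by
  unfold pvA_counter
  rw [PySem.Dict.keys_foldl_modify_key lst (fun t => t.1) PySem.Set.empty
    (fun _ t => fun s => PySem.Set.add s t.2.1) PySem.Dict.empty]
  rw [PySem.Dict.keys_empty, PySem.Set.update_nil_left]

theorem pvSet_one_lt_len (xs : List String) :
    1 < PySem.Set.len (PySem.Set.ofList xs) ↔ ∃ a ∈ xs, ∃ b ∈ xs, a ≠ b := by
  have hlen : 1 < PySem.Set.len (PySem.Set.ofList xs) ↔ 1 < (PySem.Set.ofList xs).length := by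
    simp [PySem.Set.len]
  rw [hlen]
  constructor
  · intro h
    rcases hl : PySem.Set.ofList xs with _ | ⟨a, _ | ⟨b, t⟩⟩
    · rw [hl] at h; simp at h
    · rw [hl] at h; simp at h
    · have hnd := PySem.Set.nodup_ofList (xs := xs)
      rw [hl] at hnd
      have hab : a ≠ b := by
        intro hcon; subst hcon; exact (List.nodup_cons.mp hnd).1 (List.mem_cons_self ..)
      refine ⟨a, ?_, b, ?_, hab⟩
      · exact (PySem.Set.mem_ofList xs a).mp (by rw [hl]; exact List.mem_cons_self ..)
      · exact (PySem.Set.mem_ofList xs b).mp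
          (by rw [hl]; exact List.mem_cons_of_mem _ (List.mem_cons_self ..))
  · rintro ⟨a, ha, b, hb, hab⟩
    have ha' : a ∈ PySem.Set.ofList xs := (PySem.Set.mem_ofList xs a).mpr ha
    have hb' : b ∈ PySem.Set.ofList xs := (PySem.Set.mem_ofList xs b).mpr hb
    rcases hl : PySem.Set.ofList xs with _ | ⟨x, _ | ⟨y, t⟩⟩
    · rw [hl] at ha'; simp at ha'
    · rw [hl] at ha' hb'
      simp at ha' hb'
      exact absurd (ha'.trans hb'.symm) hab
    · simp

theorem pvB_hasConflict_iff (pairs : List (String × String)) :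
    pvB_hasConflict pairs = true ↔ ∃ p ∈ pairs, ∃ q ∈ pairs, p.1 = q.1 ∧ p.2 ≠ q.2 := by
  induction pairs with
  | nil => simp [pvB_hasConflict]
  | cons p rest ih =>
      simp only [pvB_hasConflict, Bool.or_eq_true, List.any_eq_true, Bool.and_eq_true,
        beq_iff_eq, bne_iff_ne, ih, List.mem_cons]
      constructor
      · rintro (⟨q, hq, h1, h2⟩ | ⟨p', hp', q, hq, h1, h2⟩)
        · exact ⟨p, Or.inl rfl, q, Or.inr hq, h1, h2⟩
        · exact ⟨p', Or.inr hp', q, Or.inr hq, h1, h2⟩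
      · rintro ⟨p', hp', q, hq, h1, h2⟩
        rcases hp' with rfl | hp'
        · rcases hq with rfl | hq
          · exact absurd rfl h2
          · exact Or.inl ⟨q, hq, h1, h2⟩
        · rcases hq with rfl | hq
          · exact Or.inl ⟨p', hp', h1.symm, Ne.symm h2⟩
          · exact Or.inr ⟨p', hp', q, hq, h1, h2⟩

-- the two conflict tests agree on every group
theorem pvConflict_agree (lst : List (String × String × String)) :
    (((pvA_counter lst).items.filter (fun fr => 1 < PySem.Set.len fr.2)).map (·.1) ≠ []) ↔
      pvB_hasConflict (lst.map pvProj) = true := by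
  have hnd : (pvA_counter lst).keys.Nodup := by
    rw [pvA_counter_keys]; exact PySem.Set.nodup_ofList _
  rw [pvB_hasConflict_iff,
    PySem.Dict.items_eq_map_keys (pvA_counter lst) hnd PySem.Set.empty, pvA_counter_keys]
  simp only [ne_eq, List.map_eq_nil_iff, List.filter_eq_nil_iff, decide_eq_true_eq, not_forall,
    not_not, List.mem_map, exists_prop, PySem.Set.mem_ofList, pvA_counter_getD, pvProj,
    exists_exists_and_eq_and]
  simp only [pvSet_one_lt_len, List.mem_map, List.mem_filter, decide_eq_true_eq]
  constructor
  · rintro ⟨a, ha, a1, ⟨u, ⟨hu, hu1⟩, rfl⟩, b, ⟨w, ⟨hw, hw1⟩, rfl⟩, hne⟩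
    exact ⟨u, hu, w, hw, hu1.trans hw1.symm, hne⟩
  · rintro ⟨u, hu, w, hw, h1, h2⟩
    exact ⟨u, hu, u.2.1, ⟨u, ⟨hu, rfl⟩, rfl⟩, w.2.1, ⟨w, ⟨hw, h1.symm⟩, rfl⟩, h2⟩

-- the Bool conflict test applied to a raw_map entry
def pvCond (rl : String × List (String × String × String)) : Bool :=
  pvB_hasConflict (rl.2.map pvProj)

theorem pvFoldl_add_if {α : Type} (key : α → String) (c : α → Bool) :
    ∀ (l : List α) (s : PySem.Set String), (∀ x ∈ l, key x ∉ s) → (l.map key).Nodup →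
      l.foldl (fun s x => if c x then PySem.Set.add s (key x) else s) s =
        s ++ (l.filter c).map key := by
  intro l
  induction l with
  | nil => intro s _ _; simp
  | cons x t ih =>
      intro s hfresh hnd
      simp only [List.map_cons, List.nodup_cons, List.mem_map] at hnd
      by_cases h : c x
      · have hadd : PySem.Set.add s (key x) = s ++ [key x] :=
          PySem.Set.add_of_not_mem (hfresh x (List.mem_cons_self ..))
        have hfresh' : ∀ y ∈ t, key y ∉ s ++ [key x] := by
          intro y hy hmem
          rcases List.mem_append.mp hmem with hin | hin
          · exact hfresh y (List.mem_cons_of_mem _ hy) hin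
          · exact hnd.1 ⟨y, hy, List.mem_singleton.mp hin⟩
        simp only [List.foldl_cons, h, if_true, hadd, ih _ hfresh' hnd.2, List.filter_cons,
          List.map_cons, List.append_assoc, List.singleton_append]
      · simp only [List.foldl_cons, h, if_false, Bool.false_eq_true,
          ih _ (fun y hy => hfresh y (List.mem_cons_of_mem _ hy)) hnd.2, List.filter_cons]

theorem pvFoldl_insert_if {ν : Type} (c : String × List (String × String × String) → Bool)
    (g : List (String × String × String) → ν) :
    ∀ (l : List (String × List (String × String × String))) (d : PySem.Dict String ν),
      (∀ rl ∈ l, d.contains rl.1 = false) → (l.map (·.1)).Nodup →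
      (l.foldl (fun d rl => if c rl then d else d.insert rl.1 (g rl.2)) d).items =
        d.items ++ (l.filter (fun rl => !c rl)).map (fun rl => (rl.1, g rl.2)) := by
  intro l
  induction l with
  | nil => intro d _ _; simp
  | cons rl t ih =>
      intro d hfresh hnd
      simp only [List.map_cons, List.nodup_cons, List.mem_map] at hnd
      by_cases h : c rl
      · simp only [List.foldl_cons, h, if_true,
          ih _ (fun y hy => hfresh y (List.mem_cons_of_mem _ hy)) hnd.2, List.filter_cons,
          Bool.not_true, Bool.false_eq_true, if_false]
      · have hfresh' : ∀ y ∈ t, (d.insert rl.1 (g rl.2)).contains y.1 = false := by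
          intro y hy
          rw [PySem.Dict.contains_insert]
          have h1 : (y.1 == rl.1) = false := by
            simp only [beq_eq_false_iff_ne, ne_eq]
            intro hcon
            exact hnd.1 ⟨y, hy, hcon⟩
          rw [h1, hfresh y (List.mem_cons_of_mem _ hy)]
          rfl
        rw [List.foldl_cons, if_neg h, ih _ hfresh' hnd.2,
          PySem.Dict.items_insert_of_not_contains _ _ (hfresh rl (List.mem_cons_self ..))]
        simp [h]

theorem preprocess_json_spec_aux (raw_json : List (String × List (String × String))) :
    preprocess_json raw_json = preprocess_json_alt raw_json := by
  unfold preprocess_json preprocess_json_alt pvA_result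
  have hnd : ((pvA_raw_map raw_json).items.map (·.1)).Nodup := pvA_raw_map_keys_nodup raw_json
  -- B's groups are A's raw_map with the kid dropped from every stored triple
  have hitems : (pvB_groups raw_json).items =
      (pvA_raw_map raw_json).items.map (fun rl => (rl.1, rl.2.map pvProj)) := by
    rw [pvB_groups_eq]; rfl
  -- A's pair-fold with the prop-test replaced by the Bool test pvCond, split into components
  have hstep : ∀ (acc : PySem.Set String × PySem.Dict String (List (String × String)))
      (rl : String × List (String × String × String)),
      (if (((pvA_counter rl.2).items.filter (fun fr => 1 < PySem.Set.len fr.2)).map (·.1) ≠ [])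
        then (PySem.Set.add acc.1 rl.1, acc.2)
        else (acc.1, acc.2.insert rl.1 (rl.2.map (fun t => (t.1, t.2.1))))) =
      ((if pvCond rl then PySem.Set.add acc.1 rl.1 else acc.1),
       (if pvCond rl then acc.2 else acc.2.insert rl.1 (rl.2.map pvProj))) := by
    intro acc rl
    by_cases h : (((pvA_counter rl.2).items.filter
        (fun fr => 1 < PySem.Set.len fr.2)).map (·.1) ≠ [])
    · have hc : pvCond rl = true := (pvConflict_agree rl.2).mp h
      rw [if_pos h, hc]
      rfl
    · have hc : pvCond rl = false :=
        Bool.eq_false_iff.mpr (fun hcon => h ((pvConflict_agree rl.2).mpr hcon))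
      rw [if_neg h, hc]
      rfl
  have hcong : (pvA_raw_map raw_json).items.foldl (fun acc rl =>
        if ((pvA_counter rl.2).items.filter
            (fun fr => 1 < PySem.Set.len fr.2)).map (·.1) ≠ [] then
          (PySem.Set.add acc.1 rl.1, acc.2)
        else (acc.1, acc.2.insert rl.1 (rl.2.map (fun t => (t.1, t.2.1)))))
      ((PySem.Set.empty : PySem.Set String),
       (PySem.Dict.empty : PySem.Dict String (List (String × String)))) =
      (pvA_raw_map raw_json).items.foldl (fun acc rl =>
        ((if pvCond rl then PySem.Set.add acc.1 rl.1 else acc.1),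
         (if pvCond rl then acc.2 else acc.2.insert rl.1 (rl.2.map pvProj))))
      ((PySem.Set.empty : PySem.Set String),
       (PySem.Dict.empty : PySem.Dict String (List (String × String)))) :=
    PySem.List.foldl_congr_mem _ _ _ _ (fun acc rl _ => hstep acc rl)
  rw [hcong, PySem.List.foldl_prod_mk
    (fun s1 (rl : String × List (String × String × String)) =>
      if pvCond rl then PySem.Set.add s1 rl.1 else s1)
    (fun s2 rl => if pvCond rl then s2 else s2.insert rl.1 (rl.2.map pvProj))
    (pvA_raw_map raw_json).items PySem.Set.empty PySem.Dict.empty]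
  have hfst := pvFoldl_add_if (fun rl => rl.1) pvCond (pvA_raw_map raw_json).items
    PySem.Set.empty (by intro x _ h; simp [PySem.Set.empty] at h) hnd
  have hsnd := pvFoldl_insert_if pvCond (fun lst => lst.map pvProj)
    (pvA_raw_map raw_json).items PySem.Dict.empty
    (fun rl _ => PySem.Dict.contains_empty _) hnd
  rw [hfst, hsnd, hitems, List.filter_map, List.filter_map, List.map_map]
  unfold pvCond
  simp only [Function.comp_def, PySem.Set.empty, PySem.Dict.empty, List.nil_append]
  have hnodup2 : (((pvA_raw_map raw_json).items.filter
      (fun rl => pvB_hasConflict (rl.2.map pvProj))).map (fun rl => rl.1)).Nodup :=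
    List.Nodup.sublist (List.Sublist.map _ List.filter_sublist) hnd
  congr 1
  exact (PySem.Set.ofList_eq_self_of_nodup _ hnodup2).symm

-- ===== VERDICT (by name: the statement is the Claim_ definition above) =====
theorem preprocess_json_spec : Claim_equal_preprocess_json := by
  intro raw_json _ _
  unfold Spec_preprocess_json
  exact preprocess_json_spec_aux raw_json
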